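-- pv_equiv track=rewrite | github.com/lis19/Social-Network-System | network_functions.py | get_mutual_network_score
-- ===== SOURCE A (Python) =====
-- from typing import List, Tuple, Dict, TextIO
--
-- def get_mutual_network_score(person1: str, person2: str, person_to_networks: \
--                              Dict[str, List[str]]) -> int:
--     """Return the score of person2 depending on whether they have mutual
--     network(s) with person1.
--
--     >>> get_mutual_network_score('Jay Pritchett', 'Luke Dunphy', P2N)
--     0
--     >>> get_mutual_network_score('Claire Dunphy', 'Gloria Pritchett', P2N)
--     1
--     """
--
--     score = 0
--
--     if person1 in person_to_networks and person2 in person_to_networks: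
--         person1_networks = person_to_networks[person1]
--         person2_networks = person_to_networks[person2]
--         for i in person1_networks:
--             for j in person2_networks:
--                 if j == i:
--                     score += 1
--
--     return score
-- ===== SOURCE B (Python) =====
-- def get_mutual_network_score(person1, person2, person_to_networks):
--     score = 0
--     if person1 in person_to_networks and person2 in person_to_networks:
--         counts1 = {}
--         for v in person_to_networks[person1]:
--             counts1[v] = counts1.get(v, 0) + 1
--         counts2 = {}
--         for v in person_to_networks[person2]:
--             counts2[v] = counts2.get(v, 0) + 1
--         for v, c in counts1.items():
--             score += c * counts2.get(v, 0)
--     return score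
-- ===== Notes on version B (the rewrite author's own statement) =====
-- stated objective: alternative
-- what changed: Replaces the nested loop over the two network lists by frequency dictionaries built in one pass each, summing count1[v]*count2[v] over the distinct values of the first list (O(n+m) scan work instead of O(n*m), though a timing run's inputs did not show a measurable wall-clock difference).
import Mathlib
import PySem

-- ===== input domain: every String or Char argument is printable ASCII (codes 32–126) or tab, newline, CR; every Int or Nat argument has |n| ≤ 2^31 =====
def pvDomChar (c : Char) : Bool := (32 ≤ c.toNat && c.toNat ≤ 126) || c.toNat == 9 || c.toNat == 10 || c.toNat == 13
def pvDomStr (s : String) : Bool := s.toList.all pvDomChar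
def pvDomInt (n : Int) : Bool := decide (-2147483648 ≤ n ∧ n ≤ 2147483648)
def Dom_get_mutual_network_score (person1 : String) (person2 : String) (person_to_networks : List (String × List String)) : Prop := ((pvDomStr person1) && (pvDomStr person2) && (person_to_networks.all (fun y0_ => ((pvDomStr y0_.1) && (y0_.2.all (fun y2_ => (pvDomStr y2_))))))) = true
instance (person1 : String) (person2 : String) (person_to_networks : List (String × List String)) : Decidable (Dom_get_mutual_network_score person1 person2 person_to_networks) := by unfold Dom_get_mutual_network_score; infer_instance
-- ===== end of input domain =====

-- B replaces A's nested loop over the two network lists by one-pass frequency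
-- dictionaries and a sum of count products over the distinct values (objective: alternative).

-- ===== PORT A =====
def get_mutual_network_score (person1 : String) (person2 : String) (person_to_networks : List (String × List String)) : Int :=
  let d : PySem.Dict String (List String) := PySem.Dict.mk person_to_networks
  if d.contains person1 && d.contains person2 then
    let person1_networks := (d.get? person1).getD []   -- lookup guarded by the contains test
    let person2_networks := (d.get? person2).getD []
    person1_networks.foldl (fun score i =>
      person2_networks.foldl (fun s j => if j == i then s + 1 else s) score) 0
  else 0

-- ===== PORT B =====
def get_mutual_network_score_alt (person1 : String) (person2 : String) (person_to_networks : List (String × List String)) : Int :=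
  let d : PySem.Dict String (List String) := PySem.Dict.mk person_to_networks
  if d.contains person1 && d.contains person2 then
    let counts1 := ((d.get? person1).getD []).foldl
      (fun c v => c.insert v (c.getD v 0 + 1)) (PySem.Dict.empty : PySem.Dict String Int)
    let counts2 := ((d.get? person2).getD []).foldl
      (fun c v => c.insert v (c.getD v 0 + 1)) (PySem.Dict.empty : PySem.Dict String Int)
    counts1.items.foldl (fun score p => score + p.2 * counts2.getD p.1 0) 0
  else 0

-- ===== PRECONDITION & SPEC =====
def Spec_get_mutual_network_score (person1 : String) (person2 : String) (person_to_networks : List (String × List String)) (out : Int) : Prop := out = get_mutual_network_score_alt person1 person2 person_to_networks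
instance (person1 : String) (person2 : String) (person_to_networks : List (String × List String)) (out : Int) : Decidable (Spec_get_mutual_network_score person1 person2 person_to_networks out) := by unfold Spec_get_mutual_network_score; infer_instance

-- ===== CLAIM (what is proved, stated in full; the proofs are below) =====
def Claim_equal_get_mutual_network_score : Prop := ∀ (person1 : String) (person2 : String) (person_to_networks : List (String × List String)), Dom_get_mutual_network_score person1 person2 person_to_networks → Spec_get_mutual_network_score person1 person2 person_to_networks (get_mutual_network_score person1 person2 person_to_networks)

-- ===== LEMMAS AND PROOFS =====

-- On a nodup list containing x, summing a function that is 0 away from x gives f x.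
theorem pv_sum_map_single (s : List String) (x : String) (f : String → Int)
    (hn : s.Nodup) (hx : x ∈ s) :
    (s.map (fun k => if k = x then f k else 0)).sum = f x := by
  induction s with
  | nil => cases hx
  | cons a t ih =>
    simp only [List.map_cons, List.sum_cons]
    by_cases hax : a = x
    · subst hax
      rw [if_pos rfl, List.sum_eq_zero, add_zero]
      intro y hy
      rcases List.mem_map.mp hy with ⟨k, hk, rfl⟩
      have hka : k ≠ a := fun e => (List.nodup_cons.mp hn).1 (e ▸ hk)
      simp [hka]
    · rw [if_neg hax, zero_add]
      have hx' : x ∈ t := by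
        rcases List.mem_cons.mp hx with h | h
        · exact absurd h.symm hax
        · exact h
      exact ih (List.nodup_cons.mp hn).2 hx'

-- Group-by-value: summing f over l equals summing count·f over the distinct values of l.
theorem pv_sum_grouped (l : List String) (f : String → Int) :
    ((PySem.Set.ofList l).map (fun k => (List.count k l : Int) * f k)).sum
      = (l.map f).sum := by
  induction l using List.reverseRecOn with
  | nil => simp [PySem.Set.ofList]
  | append_singleton t x ih =>
    rw [PySem.Set.ofList_append_singleton]
    have hcnt : ∀ k, (List.count k (t ++ [x]) : Int)
        = (List.count k t : Int) + (if k = x then 1 else 0) := by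
      intro k
      rw [List.count_append, List.count_singleton]
      by_cases h : k = x
      · simp [h]
      · have h' : ¬x = k := fun e => h e.symm
        simp [h, h']
    by_cases hmem : x ∈ PySem.Set.ofList t
    · have hadd : (PySem.Set.ofList t).add x = PySem.Set.ofList t := by
        have hc1 : (PySem.Set.ofList t).contains x = true :=
          (PySem.Set.contains_iff _ _).mpr hmem
        unfold PySem.Set.add
        rw [hc1]
        simp
      rw [hadd]
      have hsplit : ((PySem.Set.ofList t).map (fun k => (List.count k (t ++ [x]) : Int) * f k)).sum
          = ((PySem.Set.ofList t).map (fun k => (List.count k t : Int) * f k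
              + (if k = x then f k else 0))).sum := by
        congr 1
        apply List.map_congr_left
        intro k _
        rw [hcnt k]
        by_cases h : k = x
        · simp [h]; ring
        · simp [h]
      rw [hsplit, PySem.List.sum_map_add_int,
        pv_sum_map_single _ x f (PySem.Set.nodup_ofList t) hmem, ih]
      simp
    · have hadd : (PySem.Set.ofList t).add x = PySem.Set.ofList t ++ [x] := by
        have hc0 : (PySem.Set.ofList t).contains x = false := by
          cases hcon : (PySem.Set.ofList t).contains x
          · rfl
          · exact absurd ((PySem.Set.contains_iff _ _).mp hcon) hmem
        unfold PySem.Set.add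
        rw [hc0]
        simp
      rw [hadd]
      have hxt : x ∉ t := fun h => hmem ((PySem.Set.mem_ofList t x).mpr h)
      have hsame : ((PySem.Set.ofList t).map (fun k => (List.count k (t ++ [x]) : Int) * f k)).sum
          = ((PySem.Set.ofList t).map (fun k => (List.count k t : Int) * f k)).sum := by
        congr 1
        apply List.map_congr_left
        intro k hk
        have hkx : k ≠ x := fun e => hmem (e ▸ hk)
        rw [hcnt k]
        simp [hkx]
      rw [List.map_append, List.sum_append, hsame, ih]
      simp [List.count_eq_zero_of_not_mem hxt]

theorem get_mutual_network_score_eq (person1 person2 : String)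
    (ptn : List (String × List String)) :
    get_mutual_network_score person1 person2 ptn
      = get_mutual_network_score_alt person1 person2 ptn := by
  unfold get_mutual_network_score get_mutual_network_score_alt
  set d : PySem.Dict String (List String) := PySem.Dict.mk ptn with hd
  by_cases hc : (d.contains person1 && d.contains person2) = true
  · simp only [hc, if_true]
    set l1 := (d.get? person1).getD [] with hl1
    set l2 := (d.get? person2).getD [] with hl2
    -- A side: inner loop is a count, outer loop a sum
    have hA : l1.foldl (fun score i =>
        l2.foldl (fun s j => if j == i then s + 1 else s) score) 0
        = (l1.map (fun i => (List.count i l2 : Int))).sum := by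
      have hfun : (fun (score : Int) (i : String) =>
          l2.foldl (fun s j => if j == i then s + 1 else s) score)
          = fun score i => score + (List.count i l2 : Int) := by
        funext score i
        exact PySem.List.foldl_beq_add_one l2 i score
      rw [hfun, PySem.List.foldl_add]
      simp
    -- B side: the two build loops are counters; the final loop a sum over items
    have hB : (l1.foldl (fun c v => c.insert v (c.getD v 0 + 1))
          (PySem.Dict.empty : PySem.Dict String Int)).items.foldl
          (fun score p => score + p.2 *
            (l2.foldl (fun c v => c.insert v (c.getD v 0 + 1))
              (PySem.Dict.empty : PySem.Dict String Int)).getD p.1 0) 0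
        = ((PySem.Set.ofList l1).map
            (fun k => (List.count k l1 : Int) * (List.count k l2 : Int))).sum := by
      rw [PySem.Dict.foldl_insert_getD_add_one_eq_counter l1,
        PySem.Dict.foldl_insert_getD_add_one_eq_counter l2,
        PySem.Dict.items_counter, PySem.List.foldl_add]
      rw [zero_add, List.map_map]
      congr 1
      apply List.map_congr_left
      intro k _
      simp [PySem.Dict.getD_counter]
    rw [hA, hB, pv_sum_grouped l1 (fun i => (List.count i l2 : Int))]
  · simp [hc]

-- ===== VERDICT (by name: the statement is the Claim_ definition above) =====
theorem get_mutual_network_score_spec : Claim_equal_get_mutual_network_score := by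
  intro p1 p2 ptn _
  unfold Spec_get_mutual_network_score
  exact get_mutual_network_score_eq p1 p2 ptn
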